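-- pv_equiv track=rewrite | github.com/stephenkraemer/bistro | src/mqc/mbias.py | get_sequence_context_to_array_index_table
-- ===== SOURCE A (Python) =====
-- from itertools import product, count
--
-- def get_sequence_context_to_array_index_table(motif_size: int):
--     """ Return dicts mapping sequence contexts to counter array indices
--
--     Parameters
--     ----------
--     motif_size: int
--         size of motifs (e.g. 3 or 5 bp)
--
--     Returns
--     -------
--     Dict[str, str]
--         mapping of four letter motif to array integer index of the corresponding
--         three letter motif. I.e. several motifs may map to the same index.
--     Dict[str, int]
--         mapping of three-letter motif [CGW] to array integer index.
--         Every mapping is unique.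
--     """
--
--     if motif_size % 2 != 1:
--         raise ValueError("Motif size must be an uneven number")
--
--     all_bases = ['C', 'G', 'T', 'A']
--     three_letter_bases = ['C', 'G', 'W']
--
--     n_bp_per_side = (motif_size - 1) // 2
--     binned_bases_set = ([three_letter_bases] * n_bp_per_side
--                         + [['C']] + [three_letter_bases] * n_bp_per_side)
--
--     # note that indicies are given in alphabetical sorting order
--     all_binned_motifs = sorted([''.join(motif)
--                                 for motif in product(*binned_bases_set)])
--
--     binned_motif_to_idx_mapping = {motif: i
--                                    for i, motif in
--                                    enumerate(all_binned_motifs)}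
--
--     all_bases_set = [all_bases] * n_bp_per_side + [['C']] + [all_bases] * n_bp_per_side
--     all_5bp_motifs = [''.join(motif) for motif in product(*all_bases_set)]
--
--     _5bp_to_three_letter_motif_index_mapping = {
--         motif: binned_motif_to_idx_mapping[
--             motif.translate(str.maketrans('CGTA', 'CGWW'))]
--         for motif in all_5bp_motifs}
--
--     return _5bp_to_three_letter_motif_index_mapping, binned_motif_to_idx_mapping
-- ===== SOURCE B (Python) =====
-- def get_sequence_context_to_array_index_table(motif_size: int):
--     if motif_size % 2 != 1:
--         raise ValueError("Motif size must be an uneven number")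
--
--     n_bp_per_side = (motif_size - 1) // 2
--
--     # Enumerate each flank once, in the generation order itself, carrying the
--     # motif's positional base-3 value (C=0, G=1, W=2; T and A both bin to W=2).
--     # Because 'C' < 'G' < 'W', this value IS the alphabetical-sort index, so no
--     # sort and no intermediate lookup dict are needed.
--     sides3 = [('', 0)]
--     sides4 = [('', 0)]
--     for _ in range(n_bp_per_side):
--         sides3 = [(s + b, 3 * v + d) for s, v in sides3
--                   for b, d in (('C', 0), ('G', 1), ('W', 2))]
--         sides4 = [(s + b, 3 * v + d) for s, v in sides4
--                   for b, d in (('C', 0), ('G', 1), ('T', 2), ('A', 2))]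
--
--     m = len(sides3)  # 3 ** n_bp_per_side
--
--     binned_motif_to_idx_mapping = {
--         left + 'C' + right: lv * m + rv
--         for left, lv in sides3 for right, rv in sides3}
--     _5bp_to_three_letter_motif_index_mapping = {
--         left + 'C' + right: lv * m + rv
--         for left, lv in sides4 for right, rv in sides4}
--
--     return _5bp_to_three_letter_motif_index_mapping, binned_motif_to_idx_mapping
-- ===== Notes on version B (the rewrite author's own statement) =====
-- stated objective: alternative
-- what changed: Replaces itertools.product + sorting + an intermediate motif-to-index lookup dict by a single incremental enumeration of each flank that carries a closed-form base-3 positional encoding (C=0, G=1, W=2, with T and A binned to 2), which equals the alphabetical-sort index because 'C'<'G'<'W', so both dicts are emitted directly with arithmetically computed indices; no sort and no lookup dict remain.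
import Mathlib
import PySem

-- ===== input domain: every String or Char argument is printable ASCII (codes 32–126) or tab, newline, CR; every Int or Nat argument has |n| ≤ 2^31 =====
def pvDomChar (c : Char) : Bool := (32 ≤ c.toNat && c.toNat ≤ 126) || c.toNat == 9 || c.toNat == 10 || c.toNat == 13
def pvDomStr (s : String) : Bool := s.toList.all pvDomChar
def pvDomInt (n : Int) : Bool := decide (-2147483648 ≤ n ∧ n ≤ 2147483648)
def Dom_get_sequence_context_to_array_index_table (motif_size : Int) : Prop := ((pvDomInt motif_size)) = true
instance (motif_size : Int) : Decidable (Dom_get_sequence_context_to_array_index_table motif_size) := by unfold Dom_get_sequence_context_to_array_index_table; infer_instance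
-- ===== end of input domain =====

-- B replaces itertools.product + sort + an intermediate lookup dict by one incremental
-- enumeration per flank carrying a base-3 positional index (C=0,G=1,W=2; T/A→2), which
-- equals the alphabetical-sort index since 'C'<'G'<'W'.

-- ===== PORT A =====
-- hand port of itertools.product(*ls) over lists of single characters, followed by
-- ''.join: exact (same order, each tuple kept as its List Char)
def pvProductA (ls : List (List Char)) : List (List Char) :=
  match ls with
  | [] => [[]]
  | l :: rest => l.flatMap (fun x => (pvProductA rest).map (fun m => x :: m))

-- str.translate(str.maketrans('CGTA', 'CGWW')): exact for every character
-- (C and G map to themselves, all characters other than C,G,T,A are unchanged)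
def pvTranslateCGTA (c : Char) : Char :=
  if c = 'T' then 'W' else if c = 'A' then 'W' else c

def get_sequence_context_to_array_index_table (motif_size : Int) :
    (List (String × Int)) × (List (String × Int)) :=
  -- the `motif_size % 2 != 1` guard raises ValueError; those inputs are outside Pre_
  let n_bp_per_side : Int := PySem.Int.floordiv (motif_size - 1) 2
  -- [x] * k is [] for k ≤ 0 in Python; Int.toNat clamps negatives to 0: exact
  let binned_bases_set : List (List Char) :=
    List.replicate n_bp_per_side.toNat ['C', 'G', 'W'] ++ [['C']]
      ++ List.replicate n_bp_per_side.toNat ['C', 'G', 'W']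
  let all_binned_motifs : List String :=
    PySem.List.sorted ((pvProductA binned_bases_set).map (fun m => String.ofList m)) (fun x => x) false
  let binned_motif_to_idx_mapping : PySem.Dict String Int :=
    (PySem.List.enumerate all_binned_motifs 0).foldl
      (fun d p => d.insert p.2 p.1) PySem.Dict.empty
  let all_bases_set : List (List Char) :=
    List.replicate n_bp_per_side.toNat ['C', 'G', 'T', 'A'] ++ [['C']]
      ++ List.replicate n_bp_per_side.toNat ['C', 'G', 'T', 'A']
  let all_5bp_motifs : List String := (pvProductA all_bases_set).map (fun m => String.ofList m)
  -- binned_motif_to_idx_mapping[...]: the translated key is always present on Pre_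
  -- (proved below), so the KeyError branch is unreachable and getD _ 0 is exact
  let five : PySem.Dict String Int :=
    all_5bp_motifs.foldl
      (fun d motif => d.insert motif
        (binned_motif_to_idx_mapping.getD (String.ofList (motif.toList.map pvTranslateCGTA)) 0))
      PySem.Dict.empty
  (five.items, binned_motif_to_idx_mapping.items)

-- ===== PORT B =====
def get_sequence_context_to_array_index_table_alt (motif_size : Int) :
    (List (String × Int)) × (List (String × Int)) :=
  -- the `motif_size % 2 != 1` guard raises ValueError; those inputs are outside Pre_
  let n_bp_per_side : Int := PySem.Int.floordiv (motif_size - 1) 2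
  -- one loop extends both flank tables, carrying each flank's base-3 value
  let sides :=
    (PySem.List.pyRange 0 n_bp_per_side 1).foldl
      (fun (st : List (List Char × Int) × List (List Char × Int)) _ =>
        (st.1.flatMap (fun p => [('C', (0 : Int)), ('G', 1), ('W', 2)].map
            (fun bd => (p.1 ++ [bd.1], 3 * p.2 + bd.2))),
         st.2.flatMap (fun p => [('C', (0 : Int)), ('G', 1), ('T', 2), ('A', 2)].map
            (fun bd => (p.1 ++ [bd.1], 3 * p.2 + bd.2)))))
      ([([], 0)], [([], 0)])
  let sides3 := sides.1
  let sides4 := sides.2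
  let m : Int := sides3.length
  let binned : PySem.Dict String Int :=
    (sides3.flatMap (fun l => sides3.map (fun r => (l, r)))).foldl
      (fun d lr => d.insert (String.ofList (lr.1.1 ++ 'C' :: lr.2.1)) (lr.1.2 * m + lr.2.2))
      PySem.Dict.empty
  let five : PySem.Dict String Int :=
    (sides4.flatMap (fun l => sides4.map (fun r => (l, r)))).foldl
      (fun d lr => d.insert (String.ofList (lr.1.1 ++ 'C' :: lr.2.1)) (lr.1.2 * m + lr.2.2))
      PySem.Dict.empty
  (five.items, binned.items)

-- ===== PRECONDITION & SPEC =====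
-- Pre_: A raises ValueError ("Motif size must be an uneven number") unless motif_size % 2 == 1
def Pre_get_sequence_context_to_array_index_table (motif_size : Int) : Prop :=
  PySem.Int.mod motif_size 2 = 1
instance (motif_size : Int) : Decidable (Pre_get_sequence_context_to_array_index_table motif_size) := by
  unfold Pre_get_sequence_context_to_array_index_table; infer_instance
def pvWitness_get_sequence_context_to_array_index_table : Int := 3

def Spec_get_sequence_context_to_array_index_table (motif_size : Int)
    (out : (List (String × Int)) × (List (String × Int))) : Prop :=
  out = get_sequence_context_to_array_index_table_alt motif_size
instance (motif_size : Int) (out : (List (String × Int)) × (List (String × Int))) :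
    Decidable (Spec_get_sequence_context_to_array_index_table motif_size out) := by
  unfold Spec_get_sequence_context_to_array_index_table; infer_instance

-- ===== CLAIM (what is proved, stated in full; the proofs are below) =====
def Claim_equal_get_sequence_context_to_array_index_table : Prop :=
  ∀ (motif_size : Int), Dom_get_sequence_context_to_array_index_table motif_size →
    Pre_get_sequence_context_to_array_index_table motif_size →
    Spec_get_sequence_context_to_array_index_table motif_size
      (get_sequence_context_to_array_index_table motif_size)

-- ===== LEMMAS AND PROOFS =====

-- digit value of a binned base; pvEnc is the base-3 positional encoding
def pvDigit (c : Char) : Int := if c = 'C' then 0 else if c = 'G' then 1 else 2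
def pvEnc (l : List Char) : Int := l.foldl (fun a c => 3 * a + pvDigit c) 0
def pvP (bs : List Char) (k : Nat) : List (List Char) := pvProductA (List.replicate k bs)

theorem pvEnc_append (u : List Char) (x : Char) :
    pvEnc (u ++ [x]) = 3 * pvEnc u + pvDigit x := by
  simp [pvEnc, List.foldl_append]

theorem pvP_succ_left (bs : List Char) (k : Nat) :
    pvP bs (k + 1) = bs.flatMap (fun x => (pvP bs k).map (fun m => x :: m)) := rfl

theorem pvProductA_append (xs ys : List (List Char)) :
    pvProductA (xs ++ ys) =
      (pvProductA xs).flatMap (fun u => (pvProductA ys).map (fun v => u ++ v)) := by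
  induction xs with
  | nil => simp [pvProductA]
  | cons l rest ih =>
      simp only [List.cons_append, pvProductA, ih, List.flatMap_map, List.flatMap_assoc]
      congr 1; funext x
      simp [List.map_flatMap, List.map_map, Function.comp_def]

theorem pvP_succ_right (bs : List Char) (k : Nat) :
    pvP bs (k + 1) = (pvP bs k).flatMap (fun u => bs.map (fun x => u ++ [x])) := by
  have h : List.replicate (k + 1) bs = List.replicate k bs ++ [bs] := by
    rw [List.replicate_succ']
  rw [pvP, h, pvProductA_append]
  have h1 : pvProductA [bs] = bs.map (fun x => [x]) := by
    clear h
    induction bs with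
    | nil => rfl
    | cons c cs ih => simp [pvProductA, List.flatMap] at ih ⊢; exact ih
  rw [h1]
  simp only [pvP, List.map_map]
  rfl

theorem pvP_length (bs : List Char) (k : Nat) : (pvP bs k).length = bs.length ^ k := by
  induction k with
  | zero => simp [pvP, pvProductA]
  | succ k ih =>
      rw [pvP_succ_left]
      simp [List.length_flatMap, ih, pow_succ, Nat.mul_comm]

theorem pvP_mem_length {bs : List Char} {k : Nat} {w : List Char} (h : w ∈ pvP bs k) :
    w.length = k := by
  induction k generalizing w with
  | zero => simp [pvP, pvProductA] at h; simp [h]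
  | succ k ih =>
      rw [pvP_succ_left] at h
      simp only [List.mem_flatMap, List.mem_map] at h
      obtain ⟨x, -, u, hu, rfl⟩ := h
      simp [ih hu]

theorem pvP_pairwise {bs : List Char} {R : List Char → List Char → Prop}
    {S : Char → Char → Prop} (hbs : bs.Pairwise S)
    (hcons : ∀ x u v, R u v → R (x :: u) (x :: v))
    (hhead : ∀ x y u v, S x y → R (x :: u) (y :: v)) (k : Nat) :
    (pvP bs k).Pairwise R := by
  induction k with
  | zero => simp [pvP, pvProductA]
  | succ k ih =>
      rw [pvP_succ_left, List.pairwise_flatMap]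
      constructor
      · intro x _
        exact (List.pairwise_map).2 (ih.imp (fun h => hcons x _ _ h))
      · refine hbs.imp_of_mem ?_
        intro x y hx hy hxy a ha b hb
        simp only [List.mem_map] at ha hb
        obtain ⟨u, -, rfl⟩ := ha
        obtain ⟨v, -, rfl⟩ := hb
        exact hhead x y u v hxy

theorem pvLex_append {u u' : List Char} (h : List.Lex (· < ·) u u')
    (hl : u.length = u'.length) (a b : List Char) :
    List.Lex (· < ·) (u ++ a) (u' ++ b) := by
  induction h with
  | nil => simp at hl
  | rel h => exact List.Lex.rel h
  | @cons x l₁ l₂ _ ih =>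
      exact List.Lex.cons (ih (by simpa using hl))

theorem pvLex_append_left (u : List Char) {a b : List Char}
    (h : List.Lex (· < ·) a b) : List.Lex (· < ·) (u ++ a) (u ++ b) := by
  induction u with
  | nil => simpa
  | cons x u ih => exact List.Lex.cons ih

-- the two-flank motif list (chars) and its string form
def pvMot (bs : List Char) (k : Nat) : List (List Char) :=
  (pvP bs k).flatMap (fun u => (pvP bs k).map (fun v => u ++ 'C' :: v))

theorem pvP3_pairwise_lex (k : Nat) :
    (pvP ['C', 'G', 'W'] k).Pairwise (fun u v => List.Lex (· < ·) u v) := by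
  refine pvP_pairwise (S := (· < ·)) ?_ ?_ ?_ k
  · decide
  · exact fun x u v h => List.Lex.cons h
  · exact fun x y u v h => List.Lex.rel h

theorem pvMot_pairwise_lex (k : Nat) :
    (pvMot ['C', 'G', 'W'] k).Pairwise (fun u v => List.Lex (· < ·) u v) := by
  rw [pvMot, List.pairwise_flatMap]
  constructor
  · intro u _
    refine (List.pairwise_map).2 ((pvP3_pairwise_lex k).imp_of_mem ?_)
    intro a b _ _ hab
    exact pvLex_append_left u (List.Lex.cons hab)
  · refine (pvP3_pairwise_lex k).imp_of_mem ?_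
    intro u u' hu hu' huu' a ha b hb
    simp only [List.mem_map] at ha hb
    obtain ⟨v, -, rfl⟩ := ha
    obtain ⟨v', -, rfl⟩ := hb
    exact pvLex_append huu' ((pvP_mem_length hu).trans (pvP_mem_length hu').symm) _ _

theorem pvP_nodup (bs : List Char) (hbs : bs.Nodup) (k : Nat) : (pvP bs k).Nodup := by
  refine pvP_pairwise hbs ?_ ?_ k
  · intro x u v h hc; exact h (by injection hc)
  · intro x y u v h hc; exact h (by injection hc)

theorem pvMot_nodup (bs : List Char) (hbs : bs.Nodup) (k : Nat) :
    (pvMot bs k).Nodup := by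
  rw [pvMot, List.Nodup, List.pairwise_flatMap]
  constructor
  · intro u _
    refine (List.pairwise_map).2 (((pvP_nodup bs hbs k)).imp_of_mem ?_)
    intro a b _ _ hab hc
    exact hab (by injection (List.append_cancel_left hc))
  · refine ((pvP_nodup bs hbs k)).imp_of_mem ?_
    intro u u' hu hu' huu' a ha b hb
    simp only [List.mem_map] at ha hb
    obtain ⟨v, -, rfl⟩ := ha
    obtain ⟨v', -, rfl⟩ := hb
    intro hc
    exact huu' (List.append_inj_left hc
      ((pvP_mem_length hu).trans (pvP_mem_length hu').symm))

theorem pvMot_strings_pairwise_lt (k : Nat) :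
    ((pvMot ['C', 'G', 'W'] k).map (fun m => String.ofList m)).Pairwise (· < ·) := by
  refine (List.pairwise_map).2 ((pvMot_pairwise_lex k).imp ?_)
  intro a b hab
  rw [String.lt_iff_toList_lt]
  simpa [List.lt_iff_lex_lt] using hab

-- enumerate plumbing
theorem pvEnum_add {α : Type} (xs : List α) (s : Int) :
    ∀ t : Int, PySem.List.enumerate xs (s + t) =
      (PySem.List.enumerate xs t).map (fun p => (p.1 + s, p.2)) := by
  induction xs with
  | nil => intro t; simp [PySem.List.enumerate_nil]
  | cons x xs ih =>
      intro t
      rw [PySem.List.enumerate_cons, PySem.List.enumerate_cons, List.map_cons]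
      refine congrArg₂ _ (by simp [Int.add_comm]) ?_
      rw [show s + t + 1 = s + (t + 1) by ring, ih (t + 1)]

theorem pvEnum_flatMap {α β : Type} (f : α → List β) (c : Int) :
    ∀ (L : List α) (s : Int), (∀ a ∈ L, ((f a).length : Int) = c) →
      PySem.List.enumerate (L.flatMap f) (s * c) =
        (PySem.List.enumerate L s).flatMap (fun p => PySem.List.enumerate (f p.2) (p.1 * c)) := by
  intro L
  induction L with
  | nil => intro s _; simp [PySem.List.enumerate_nil]
  | cons a L ih =>
      intro s h
      rw [List.flatMap_cons, PySem.List.enumerate_append, PySem.List.enumerate_cons,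
        List.flatMap_cons]
      refine congrArg₂ _ rfl ?_
      rw [h a (by simp), show s * c + c = (s + 1) * c by ring]
      exact ih (s + 1) (fun a ha => h a (by simp [ha]))

theorem pvEnum_map {α β : Type} (f : α → β) (xs : List α) :
    ∀ s : Int, PySem.List.enumerate (xs.map f) s =
      (PySem.List.enumerate xs s).map (fun p => (p.1, f p.2)) := by
  induction xs with
  | nil => intro s; simp [PySem.List.enumerate_nil]
  | cons x xs ih =>
      intro s
      rw [List.map_cons, PySem.List.enumerate_cons, PySem.List.enumerate_cons,
        List.map_cons]
      exact congrArg₂ _ rfl (ih (s + 1))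

-- position of a flank in pvP equals its base-3 encoding
theorem pvEnum_P3 (k : Nat) :
    PySem.List.enumerate (pvP ['C', 'G', 'W'] k) 0 =
      (pvP ['C', 'G', 'W'] k).map (fun u => (pvEnc u, u)) := by
  induction k with
  | zero =>
      simp [pvP, pvProductA, PySem.List.enumerate_cons, PySem.List.enumerate_nil, pvEnc]
  | succ k ih =>
      have h := pvEnum_flatMap (fun u => (['C', 'G', 'W'] : List Char).map (fun x => u ++ [x])) 3
        (pvP ['C', 'G', 'W'] k) 0 (by intro a _; simp)
      norm_num at h
      rw [pvP_succ_right]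
      simp only [List.map_cons, List.map_nil]
      rw [h, ih, List.flatMap_map, List.map_flatMap]
      congr 1
      funext u
      simp [pvEnc_append, pvDigit]
      omega


theorem pvOfList_injective : Function.Injective String.ofList := by
  intro a b h
  rw [← String.toList_ofList (l := a), h, String.toList_ofList]

-- the common normal form of both dicts' items lists
def pvTable (bs : List Char) (k : Nat) : List (String × Int) :=
  (pvP bs k).flatMap (fun u => (pvP bs k).map (fun v =>
    (String.ofList (u ++ 'C' :: v), pvEnc u * (3 : Int) ^ k + pvEnc v)))

def pvPairs (bs : List Char) (k : Nat) : List (List Char × Int) :=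
  (pvP bs k).map (fun u => (u, pvEnc u))

def pvAbinnedDict (k : Nat) : PySem.Dict String Int :=
  (PySem.List.enumerate ((pvMot ['C', 'G', 'W'] k).map String.ofList) 0).foldl
    (fun d p => d.insert p.2 p.1) PySem.Dict.empty

theorem pvMot_strings_nodup (bs : List Char) (hbs : bs.Nodup) (k : Nat) :
    ((pvMot bs k).map String.ofList).Nodup :=
  (pvMot_nodup bs hbs k).map pvOfList_injective

theorem pvLen3 (k : Nat) : (((pvP ['C', 'G', 'W'] k).length : Nat) : Int) = (3 : Int) ^ k := by
  rw [pvP_length]; push_cast; norm_num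

theorem pvAbinnedDict_items (k : Nat) :
    (pvAbinnedDict k).items = pvTable ['C', 'G', 'W'] k := by
  rw [pvAbinnedDict]
  refine Eq.trans (PySem.Dict.items_foldl_insert_fresh
      (PySem.List.enumerate ((pvMot ['C', 'G', 'W'] k).map String.ofList) 0)
      (fun p => p.2) (fun p => p.1) PySem.Dict.empty
      (by intro a _; simp [PySem.Dict.contains_empty])
      (by rw [PySem.List.map_snd_enumerate]
          exact (pvMot_strings_pairwise_lt k).imp ne_of_lt)) ?_
  rw [pvEnum_map]
  have hmot : PySem.List.enumerate (pvMot ['C', 'G', 'W'] k) 0 =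
      (pvP ['C', 'G', 'W'] k).flatMap (fun u =>
        (pvP ['C', 'G', 'W'] k).map (fun v => (pvEnc u * (3 : Int) ^ k + pvEnc v, u ++ 'C' :: v))) := by
    have h := pvEnum_flatMap (fun u => (pvP ['C', 'G', 'W'] k).map (fun v => u ++ 'C' :: v))
      ((3 : Int) ^ k) (pvP ['C', 'G', 'W'] k) 0
      (by intro a _; rw [List.length_map]; exact pvLen3 k)
    norm_num at h
    rw [pvMot, h, pvEnum_P3, List.flatMap_map]
    refine List.flatMap_congr ?_
    intro u _
    rw [pvEnum_map]
    have hs : pvEnc u * (3 : Int) ^ k + 0 = pvEnc u * (3 : Int) ^ k := by ring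
    rw [← hs, pvEnum_add, pvEnum_P3]
    simp only [List.map_map]
    refine List.map_congr_left ?_
    intro v _
    simp [Int.add_comm]
  rw [hmot, pvTable]
  have he : (PySem.Dict.empty : PySem.Dict String Int).items = [] := rfl
  rw [he, List.nil_append, List.map_map, List.map_flatMap]
  refine List.flatMap_congr ?_
  intro u _
  simp only [List.map_map]
  rfl

theorem pvAbinnedDict_keys_nodup (k : Nat) : (pvAbinnedDict k).keys.Nodup := by
  have h : (pvAbinnedDict k).keys = (pvTable ['C', 'G', 'W'] k).map (fun p => p.1) := by
    simp only [PySem.Dict.keys, pvAbinnedDict_items]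
  rw [h]
  have h2 : (pvTable ['C', 'G', 'W'] k).map (fun p => p.1) =
      (pvMot ['C', 'G', 'W'] k).map String.ofList := by
    rw [pvTable, pvMot, List.map_flatMap, List.map_flatMap]
    refine List.flatMap_congr ?_
    intro u _
    simp only [List.map_map]
    rfl
  rw [h2]
  exact pvMot_strings_nodup _ (by decide) k

theorem pvGetD (k : Nat) {a b : List Char}
    (ha : a ∈ pvP ['C', 'G', 'W'] k) (hb : b ∈ pvP ['C', 'G', 'W'] k) :
    (pvAbinnedDict k).getD (String.ofList (a ++ 'C' :: b)) 0 =
      pvEnc a * (3 : Int) ^ k + pvEnc b := by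
  refine PySem.Dict.getD_of_mem_items _ ?_ (pvAbinnedDict_keys_nodup k) 0
  rw [pvAbinnedDict_items, pvTable]
  simp only [List.mem_flatMap, List.mem_map]
  exact ⟨a, ha, ⟨b, hb, rfl⟩⟩

theorem pvDigit_translate (c : Char) : pvDigit (pvTranslateCGTA c) = pvDigit c := by
  rw [pvTranslateCGTA]
  split_ifs with h1 h2
  · simp [pvDigit, h1]
  · simp [pvDigit, h2]
  · rfl

theorem pvEnc_map_translate (u : List Char) :
    pvEnc (u.map pvTranslateCGTA) = pvEnc u := by
  induction u using List.reverseRecOn with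
  | nil => rfl
  | append_singleton u x ih => simp [pvEnc_append, ih, pvDigit_translate]

theorem pvP_map_translate {k : Nat} {u : List Char} (hu : u ∈ pvP ['C', 'G', 'T', 'A'] k) :
    u.map pvTranslateCGTA ∈ pvP ['C', 'G', 'W'] k := by
  induction k generalizing u with
  | zero => simp [pvP, pvProductA] at hu ⊢; simp [hu]
  | succ k ih =>
      rw [pvP_succ_left] at hu ⊢
      simp only [List.mem_flatMap, List.mem_map] at hu ⊢
      obtain ⟨x, hx, w, hw, rfl⟩ := hu
      exact ⟨pvTranslateCGTA x, by fin_cases hx <;> decide, w.map pvTranslateCGTA, ih hw, by simp⟩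

theorem pvAfive_items (k : Nat) :
    (((pvMot ['C', 'G', 'T', 'A'] k).map String.ofList).foldl
      (fun d motif => d.insert motif
        ((pvAbinnedDict k).getD (String.ofList (motif.toList.map pvTranslateCGTA)) 0))
      PySem.Dict.empty).items = pvTable ['C', 'G', 'T', 'A'] k := by
  refine Eq.trans (PySem.Dict.items_foldl_insert_fresh
      ((pvMot ['C', 'G', 'T', 'A'] k).map String.ofList) (fun motif => motif)
      (fun motif => (pvAbinnedDict k).getD (String.ofList (motif.toList.map pvTranslateCGTA)) 0)
      PySem.Dict.empty
      (by intro a _; simp [PySem.Dict.contains_empty])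
      (by rw [List.map_id']; exact pvMot_strings_nodup _ (by decide) k)) ?_
  have : (PySem.Dict.empty : PySem.Dict String Int).items = [] := rfl
  rw [this, List.nil_append, List.map_map, pvMot, List.map_flatMap, pvTable]
  refine List.flatMap_congr ?_
  intro u hu
  simp only [List.map_map]
  refine List.map_congr_left ?_
  intro v hv
  simp only [Function.comp_apply, String.toList_ofList, List.map_append, List.map_cons]
  have hc : pvTranslateCGTA 'C' = 'C' := by decide
  rw [hc]
  have hg := pvGetD k (pvP_map_translate hu) (pvP_map_translate hv)
  rw [hg, pvEnc_map_translate, pvEnc_map_translate]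

theorem pvBtable (bs : List Char) (hbs : bs.Nodup) (k : Nat) :
    (((pvPairs bs k).flatMap (fun l => (pvPairs bs k).map (fun r => (l, r)))).foldl
      (fun d lr => d.insert (String.ofList (lr.1.1 ++ 'C' :: lr.2.1))
        (lr.1.2 * (3 : Int) ^ k + lr.2.2)) PySem.Dict.empty).items = pvTable bs k := by
  refine Eq.trans (PySem.Dict.items_foldl_insert_fresh
      ((pvPairs bs k).flatMap (fun l => (pvPairs bs k).map (fun r => (l, r))))
      (fun lr => String.ofList (lr.1.1 ++ 'C' :: lr.2.1))
      (fun lr => lr.1.2 * (3 : Int) ^ k + lr.2.2) PySem.Dict.empty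
      (by intro a _; simp [PySem.Dict.contains_empty])
      (by have : ((pvPairs bs k).flatMap (fun l => (pvPairs bs k).map (fun r => (l, r)))).map
              (fun lr => String.ofList (lr.1.1 ++ 'C' :: lr.2.1)) =
            (pvMot bs k).map String.ofList := by
            rw [pvPairs, pvMot, List.flatMap_map, List.map_flatMap, List.map_flatMap]
            refine List.flatMap_congr ?_
            intro u _
            simp only [List.map_map]
            rfl
          rw [this]
          exact pvMot_strings_nodup bs hbs k)) ?_
  have : (PySem.Dict.empty : PySem.Dict String Int).items = [] := rfl
  rw [this, List.nil_append, pvPairs, pvTable, List.flatMap_map, List.map_flatMap]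
  refine List.flatMap_congr ?_
  intro u _
  simp only [List.map_map]
  rfl

theorem pvFoldl_const {α β : Type} (g : α → α) (l : List β) (init : α) :
    l.foldl (fun st _ => g st) init = g^[l.length] init := by
  induction l generalizing init with
  | nil => rfl
  | cons x l ih => rw [List.foldl_cons, List.length_cons, ih, Function.iterate_succ_apply]

-- B's loop body
def pvStep (st : List (List Char × Int) × List (List Char × Int)) :
    List (List Char × Int) × List (List Char × Int) :=
  (st.1.flatMap (fun p => [('C', (0 : Int)), ('G', 1), ('W', 2)].map
      (fun bd => (p.1 ++ [bd.1], 3 * p.2 + bd.2))),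
   st.2.flatMap (fun p => [('C', (0 : Int)), ('G', 1), ('T', 2), ('A', 2)].map
      (fun bd => (p.1 ++ [bd.1], 3 * p.2 + bd.2))))

theorem pvSides (k : Nat) :
    pvStep^[k] ([([], 0)], [([], 0)]) =
      (pvPairs ['C', 'G', 'W'] k, pvPairs ['C', 'G', 'T', 'A'] k) := by
  induction k with
  | zero => simp [pvPairs, pvP, pvProductA, pvEnc]
  | succ k ih =>
      rw [Function.iterate_succ_apply', ih, pvStep]
      refine congrArg₂ _ ?_ ?_ <;>
      · simp only [pvPairs]
        rw [pvP_succ_right, List.flatMap_map, List.map_flatMap]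
        refine List.flatMap_congr ?_
        intro u _
        simp [pvEnc_append, pvDigit]


theorem pvProd_mid (bs : List Char) (k : Nat) :
    pvProductA (List.replicate k bs ++ [['C']] ++ List.replicate k bs) = pvMot bs k := by
  rw [pvProductA_append, pvProductA_append]
  have h1 : pvProductA [['C']] = [['C']] := rfl
  rw [h1, pvMot]
  simp only [List.map_cons, List.map_nil]
  rw [List.flatMap_assoc]
  refine List.flatMap_congr ?_
  intro u _
  simp only [List.flatMap_cons, List.flatMap_nil, List.append_nil]
  rw [pvP]
  refine List.map_congr_left ?_
  intro v _
  simp [List.append_assoc]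

theorem pvSidesFold (n : Int) :
    (PySem.List.pyRange 0 n 1).foldl
      (fun (st : List (List Char × Int) × List (List Char × Int)) (_ : Int) =>
        (st.1.flatMap (fun p => [('C', (0 : Int)), ('G', 1), ('W', 2)].map
            (fun bd => (p.1 ++ [bd.1], 3 * p.2 + bd.2))),
         st.2.flatMap (fun p => [('C', (0 : Int)), ('G', 1), ('T', 2), ('A', 2)].map
            (fun bd => (p.1 ++ [bd.1], 3 * p.2 + bd.2)))))
      ([([], 0)], [([], 0)]) =
      (pvPairs ['C', 'G', 'W'] n.toNat, pvPairs ['C', 'G', 'T', 'A'] n.toNat) := by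
  refine Eq.trans (pvFoldl_const pvStep (PySem.List.pyRange 0 n 1) ([([], 0)], [([], 0)])) ?_
  rw [PySem.List.length_pyRange_one]
  have h : (n - 0).toNat = n.toNat := by norm_num
  rw [h, pvSides]

theorem pvA_eq (ms : Int) :
    get_sequence_context_to_array_index_table ms =
      (pvTable ['C', 'G', 'T', 'A'] (PySem.Int.floordiv (ms - 1) 2).toNat,
       pvTable ['C', 'G', 'W'] (PySem.Int.floordiv (ms - 1) 2).toNat) := by
  unfold get_sequence_context_to_array_index_table
  simp only [pvProd_mid]
  rw [PySem.List.sorted_eq_of_perm_of_pairwise_lt _ _ _ (List.Perm.refl _)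
    (pvMot_strings_pairwise_lt (PySem.Int.floordiv (ms - 1) 2).toNat)]
  exact congrArg₂ Prod.mk
    (pvAfive_items (PySem.Int.floordiv (ms - 1) 2).toNat)
    (pvAbinnedDict_items (PySem.Int.floordiv (ms - 1) 2).toNat)

theorem pvB_eq (ms : Int) :
    get_sequence_context_to_array_index_table_alt ms =
      (pvTable ['C', 'G', 'T', 'A'] (PySem.Int.floordiv (ms - 1) 2).toNat,
       pvTable ['C', 'G', 'W'] (PySem.Int.floordiv (ms - 1) 2).toNat) := by
  unfold get_sequence_context_to_array_index_table_alt
  simp only [pvSidesFold]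
  have hm : (((pvPairs ['C', 'G', 'W'] (PySem.Int.floordiv (ms - 1) 2).toNat).length : Nat) : Int)
      = (3 : Int) ^ (PySem.Int.floordiv (ms - 1) 2).toNat := by
    rw [pvPairs, List.length_map]; exact pvLen3 _
  simp only [hm]
  exact congrArg₂ Prod.mk
    (pvBtable ['C', 'G', 'T', 'A'] (by decide) _)
    (pvBtable ['C', 'G', 'W'] (by decide) _)

-- ===== VERDICT (by name: the statement is the Claim_ definition above) =====
theorem get_sequence_context_to_array_index_table_spec :
    Claim_equal_get_sequence_context_to_array_index_table := by
  intro ms _ _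
  unfold Spec_get_sequence_context_to_array_index_table
  rw [pvA_eq, pvB_eq]
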